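-- pv_equiv track=rewrite | github.com/sukumarbarman/goastrion-v1 | goastrion-backend/astro/domain/rules.py | _has_house_support
-- ===== SOURCE A (Python) =====
-- from typing import Dict, List, Tuple, Any, Set, Optional, Iterable, Union
--
-- def _has_house_support(p2h: Dict[str, List[int]], target_houses: List[int], key_planets: List[str] | None = None) -> int:
--     occupied = set()
--     for planet, houses in p2h.items():
--         if key_planets and planet not in key_planets:
--             continue
--         for h in houses:
--             if h in target_houses:
--                 occupied.add(h)
--     return len(occupied)
-- ===== SOURCE B (Python) =====
-- def _has_house_support(p2h, target_houses, key_planets=None):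
--     # Inverted traversal: flatten the relevant planets' houses into one list,
--     # then iterate over the distinct target houses and count those present in it.
--     # No occupied-set is built.
--     all_houses = [h for planet, houses in p2h.items()
--                   if not key_planets or planet in key_planets
--                   for h in houses]
--     return sum(1 for h in dict.fromkeys(target_houses) if h in all_houses)
-- ===== Notes on version B (the rewrite author's own statement) =====
-- stated objective: alternative
-- what changed: B inverts the traversal: instead of sweeping planets and accumulating a set of occupied target houses, it flattens the relevant planets' houses into one list once and then counts the distinct target houses present in it, building no set at all.
import Mathlib
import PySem

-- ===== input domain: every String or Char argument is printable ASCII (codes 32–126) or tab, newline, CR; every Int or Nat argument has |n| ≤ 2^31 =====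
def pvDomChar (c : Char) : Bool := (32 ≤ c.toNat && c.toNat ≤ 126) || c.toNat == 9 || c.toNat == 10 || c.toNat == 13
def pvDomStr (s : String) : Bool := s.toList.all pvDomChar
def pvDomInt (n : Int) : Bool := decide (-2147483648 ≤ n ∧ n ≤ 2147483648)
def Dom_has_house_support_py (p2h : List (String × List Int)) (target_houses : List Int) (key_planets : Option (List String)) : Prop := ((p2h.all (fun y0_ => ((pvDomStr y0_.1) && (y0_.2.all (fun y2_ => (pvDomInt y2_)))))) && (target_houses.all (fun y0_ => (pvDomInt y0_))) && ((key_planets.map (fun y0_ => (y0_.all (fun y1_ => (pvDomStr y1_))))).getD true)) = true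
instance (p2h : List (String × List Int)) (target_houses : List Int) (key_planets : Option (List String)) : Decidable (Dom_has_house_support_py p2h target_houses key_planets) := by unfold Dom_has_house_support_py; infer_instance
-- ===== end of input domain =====

-- B inverts the traversal: it iterates over the distinct target houses and counts those occupied
-- by some relevant planet, instead of sweeping planets and accumulating a set (alternative; same result).

-- ===== PORT A =====
def has_house_support_py (p2h : List (String × List Int)) (target_houses : List Int) (key_planets : Option (List String)) : Int :=
  let occupied : PySem.Set Int :=
    p2h.foldl (fun occ pr =>
      if (match key_planets with
          | some ks => !ks.isEmpty && !ks.contains pr.1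
          | none => false) then occ
      else pr.2.foldl (fun occ h => if target_houses.contains h then PySem.Set.add occ h else occ) occ)
      PySem.Set.empty
  PySem.Set.len occupied

-- ===== PORT B =====
-- 'not key_planets or planet in key_planets'
def pvRelevant (key_planets : Option (List String)) (planet : String) : Bool :=
  match key_planets with
  | none => true
  | some ks => ks.isEmpty || ks.contains planet

-- 'all_houses = [h for planet, houses in p2h.items() if ... for h in houses]'
def pvAllHouses (p2h : List (String × List Int)) (key_planets : Option (List String)) : List Int :=
  (p2h.filter (fun pr => pvRelevant key_planets pr.1)).flatMap Prod.snd

-- sum(1 for h in dict.fromkeys(target_houses) if h in all_houses)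
def has_house_support_py_alt (p2h : List (String × List Int)) (target_houses : List Int) (key_planets : Option (List String)) : Int :=
  let all_houses := pvAllHouses p2h key_planets
  ((PySem.List.dedup target_houses).filter (fun h => all_houses.contains h)).length

-- ===== PRECONDITION & SPEC =====
def Spec_has_house_support_py (p2h : List (String × List Int)) (target_houses : List Int) (key_planets : Option (List String)) (out : Int) : Prop := out = has_house_support_py_alt p2h target_houses key_planets
instance (p2h : List (String × List Int)) (target_houses : List Int) (key_planets : Option (List String)) (out : Int) : Decidable (Spec_has_house_support_py p2h target_houses key_planets out) := by unfold Spec_has_house_support_py; infer_instance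

-- ===== CLAIM =====
def Claim_equal_has_house_support_py : Prop := ∀ (p2h : List (String × List Int)) (target_houses : List Int) (key_planets : Option (List String)), Dom_has_house_support_py p2h target_houses key_planets → Spec_has_house_support_py p2h target_houses key_planets (has_house_support_py p2h target_houses key_planets)

-- ===== LEMMAS AND PROOFS =====

-- A's skip test is the negation of B's relevance test
theorem pv_skip_eq (kp : Option (List String)) (p : String) :
    (match kp with
     | some ks => !ks.isEmpty && !ks.contains p
     | none => false) = !pvRelevant kp p := by
  cases kp <;> simp [pvRelevant]

-- inner loop of A: membership
theorem pv_inner_mem (t houses : List Int) (s : PySem.Set Int) (h : Int) :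
    h ∈ houses.foldl (fun occ x => if t.contains x then PySem.Set.add occ x else occ) s ↔
      h ∈ s ∨ (h ∈ houses ∧ h ∈ t) := by
  induction houses generalizing s with
  | nil => simp
  | cons x xs ih =>
      simp only [List.foldl_cons, List.mem_cons]
      by_cases hc : t.contains x = true
      · rw [if_pos hc, ih, PySem.Set.mem_add]
        constructor
        · rintro ((hs | rfl) | ⟨hx, ht⟩)
          · exact Or.inl hs
          · exact Or.inr ⟨Or.inl rfl, by simpa using hc⟩
          · exact Or.inr ⟨Or.inr hx, ht⟩
        · rintro (hs | ⟨(rfl | hx), ht⟩)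
          · exact Or.inl (Or.inl hs)
          · exact Or.inl (Or.inr rfl)
          · exact Or.inr ⟨hx, ht⟩
      · rw [if_neg hc, ih]
        constructor
        · rintro (hs | ⟨hx, ht⟩)
          · exact Or.inl hs
          · exact Or.inr ⟨Or.inr hx, ht⟩
        · rintro (hs | ⟨(rfl | hx), ht⟩)
          · exact Or.inl hs
          · exact absurd (by simpa using ht) (by simpa using hc)
          · exact Or.inr ⟨hx, ht⟩

-- inner loop of A: keeps the set duplicate-free
theorem pv_inner_nodup (t houses : List Int) (s : PySem.Set Int) (hs : s.Nodup) :
    (houses.foldl (fun occ x => if t.contains x then PySem.Set.add occ x else occ) s).Nodup := by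
  induction houses generalizing s with
  | nil => exact hs
  | cons x xs ih =>
      simp only [List.foldl_cons]
      by_cases hc : t.contains x = true
      · rw [if_pos hc]; exact ih _ (PySem.Set.nodup_add _ _ hs)
      · rw [if_neg hc]; exact ih _ hs

-- outer loop of A (condition rewritten through pv_skip_eq): membership
theorem pv_outer_mem (p2h : List (String × List Int)) (t : List Int) (kp : Option (List String))
    (s : PySem.Set Int) (h : Int) :
    h ∈ p2h.foldl (fun occ pr =>
        if !pvRelevant kp pr.1 then occ
        else pr.2.foldl (fun occ x => if t.contains x then PySem.Set.add occ x else occ) occ) s ↔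
      h ∈ s ∨ ∃ pr ∈ p2h, pvRelevant kp pr.1 = true ∧ h ∈ pr.2 ∧ h ∈ t := by
  induction p2h generalizing s with
  | nil => simp
  | cons pr rest ih =>
      simp only [List.foldl_cons, List.mem_cons]
      by_cases hr : pvRelevant kp pr.1 = true
      · rw [hr]
        simp only [Bool.not_true, Bool.false_eq_true, if_false]
        rw [ih, pv_inner_mem]
        constructor
        · rintro ((hs | ⟨hh, ht⟩) | ⟨q, hq, hrel, hh, ht⟩)
          · exact Or.inl hs
          · exact Or.inr ⟨pr, Or.inl rfl, hr, hh, ht⟩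
          · exact Or.inr ⟨q, Or.inr hq, hrel, hh, ht⟩
        · rintro (hs | ⟨q, (rfl | hq), hrel, hh, ht⟩)
          · exact Or.inl (Or.inl hs)
          · exact Or.inl (Or.inr ⟨hh, ht⟩)
          · exact Or.inr ⟨q, hq, hrel, hh, ht⟩
      · rw [Bool.not_eq_true] at hr
        rw [hr]
        simp only [Bool.not_false, if_true]
        rw [ih]
        constructor
        · rintro (hs | ⟨q, hq, hrel, hh, ht⟩)
          · exact Or.inl hs
          · exact Or.inr ⟨q, Or.inr hq, hrel, hh, ht⟩
        · rintro (hs | ⟨q, (rfl | hq), hrel, hh, ht⟩)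
          · exact Or.inl hs
          · exact absurd hrel (by simp [hr])
          · exact Or.inr ⟨q, hq, hrel, hh, ht⟩

-- outer loop of A: keeps the set duplicate-free
theorem pv_outer_nodup (p2h : List (String × List Int)) (t : List Int) (kp : Option (List String))
    (s : PySem.Set Int) (hs : s.Nodup) :
    (p2h.foldl (fun occ pr =>
        if !pvRelevant kp pr.1 then occ
        else pr.2.foldl (fun occ x => if t.contains x then PySem.Set.add occ x else occ) occ) s).Nodup := by
  induction p2h generalizing s with
  | nil => exact hs
  | cons pr rest ih =>
      simp only [List.foldl_cons]
      by_cases hr : pvRelevant kp pr.1 = true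
      · rw [hr]
        simp only [Bool.not_true, Bool.false_eq_true, if_false]
        exact ih _ (pv_inner_nodup t pr.2 s hs)
      · rw [Bool.not_eq_true] at hr
        rw [hr]
        simp only [Bool.not_false, if_true]
        exact ih _ hs

-- ===== VERDICT =====
theorem has_house_support_py_spec : Claim_equal_has_house_support_py := by
  intro p2h t kp _
  unfold Spec_has_house_support_py has_house_support_py has_house_support_py_alt
  dsimp only
  have hfun : (fun (occ : PySem.Set Int) (pr : String × List Int) =>
      if (match kp with
          | some ks => !ks.isEmpty && !ks.contains pr.1
          | none => false) then occ
      else pr.2.foldl (fun occ h => if t.contains h then PySem.Set.add occ h else occ) occ)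
    = (fun (occ : PySem.Set Int) (pr : String × List Int) =>
      if !pvRelevant kp pr.1 then occ
      else pr.2.foldl (fun occ h => if t.contains h then PySem.Set.add occ h else occ) occ) := by
    funext occ pr
    rw [pv_skip_eq]
  rw [hfun]
  have hA := pv_outer_nodup p2h t kp PySem.Set.empty List.nodup_nil
  have hB : ((PySem.List.dedup t).filter
      (fun h => (pvAllHouses p2h kp).contains h)).Nodup :=
    (PySem.List.nodup_dedup t).filter _
  have hmem : ∀ h : Int,
      h ∈ (p2h.foldl (fun occ pr =>
        if !pvRelevant kp pr.1 then occ
        else pr.2.foldl (fun occ x => if t.contains x then PySem.Set.add occ x else occ) occ)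
        PySem.Set.empty) ↔
      h ∈ (PySem.List.dedup t).filter
        (fun h => (pvAllHouses p2h kp).contains h) := by
    intro h
    rw [pv_outer_mem, List.mem_filter, PySem.List.mem_dedup]
    simp only [PySem.Set.empty, List.not_mem_nil, false_or, pvAllHouses,
      List.mem_flatMap, List.mem_filter, List.contains_iff_mem]
    constructor
    · rintro ⟨pr, hpr, hrel, hh, ht⟩
      exact ⟨ht, pr, ⟨hpr, hrel⟩, hh⟩
    · rintro ⟨ht, pr, ⟨hpr, hrel⟩, hh⟩
      exact ⟨pr, hpr, hrel, hh, ht⟩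
  have hperm := (List.perm_ext_iff_of_nodup hA hB).mpr hmem
  rw [PySem.Set.len, hperm.length_eq]
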